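-- pv_equiv track=rewrite | github.com/mavkasgit/hrms | backend/alembic/versions/20260430_1530_7a1f2d9c6b4e_normalize_file_storage_paths.py | _storage_key
-- ===== SOURCE A (Python) =====
-- def _storage_key(path: str, marker: str) -> str:
--     normalized = str(path).strip().replace("\\", "/")
--     if not normalized:
--         return normalized
--
--     parts = [part for part in normalized.split("/") if part and part != "."]
--     if marker in parts:
--         marker_index = len(parts) - 1 - list(reversed(parts)).index(marker)
--         parts = parts[marker_index + 1 :]
--
--     if any(part == ".." for part in parts):
--         return normalized
--     return "/".join(parts)
-- ===== SOURCE B (Python) =====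
-- def _storage_key(path: str, marker: str) -> str:
--     normalized = str(path).strip().replace("\\", "/")
--     if not normalized:
--         return normalized
--
--     acc = []
--     has_dotdot = False
--     for seg in normalized.split("/"):
--         if not seg or seg == ".":
--             continue
--         if seg == marker:
--             acc = []
--             has_dotdot = False
--         else:
--             acc.append(seg)
--             if seg == "..":
--                 has_dotdot = True
--     return normalized if has_dotdot else "/".join(acc)
-- ===== Notes on version B (the rewrite author's own statement) =====
-- stated objective: simpler
-- what changed: Replaces A's staged pipeline (filter pass, membership test, reversed-list index and slice, then a separate '..' scan) with one forward loop over the raw split segments that filters, resets on the marker and tracks a '..' flag in a single pass.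
import Mathlib
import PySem

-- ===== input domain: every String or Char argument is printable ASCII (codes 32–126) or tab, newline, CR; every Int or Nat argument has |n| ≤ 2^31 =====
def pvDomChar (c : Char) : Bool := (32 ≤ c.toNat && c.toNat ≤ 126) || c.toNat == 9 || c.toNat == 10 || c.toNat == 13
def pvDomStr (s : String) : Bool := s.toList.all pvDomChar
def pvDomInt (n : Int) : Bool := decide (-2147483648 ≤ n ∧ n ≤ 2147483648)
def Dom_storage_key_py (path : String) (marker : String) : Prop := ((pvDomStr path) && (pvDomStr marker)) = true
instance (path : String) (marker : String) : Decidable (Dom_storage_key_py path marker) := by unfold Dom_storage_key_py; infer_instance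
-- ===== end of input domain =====

-- Same return value via a different decomposition: B fuses A's staged pipeline (filter, membership
-- test, reversed-list index/slice, separate '..' scan) into ONE forward fold over the raw split
-- segments, maintaining an accumulator reset at the marker plus a '..' flag (objective: simpler).


-- ===== PORT A =====
def storage_key_py (path : String) (marker : String) : String :=
  let normalized := PySem.Str.replace (PySem.Str.strip path) "\\" "/"
  if normalized == "" then normalized
  else
    let parts := ((PySem.Str.split? normalized "/").getD []).filter (fun p => p != "" && p != ".")
    let parts :=
      if parts.contains marker then
        -- marker_index = len(parts) - 1 - list(reversed(parts)).index(marker)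
        -- (.index is guarded by the contains test, so the Option is some; getD 0 is the guarded total form)
        let markerIndex : Int :=
          (parts.length : Int) - 1 - (((PySem.List.index? parts.reverse marker).getD 0 : Nat) : Int)
        PySem.List.slice parts (some (markerIndex + 1)) none
      else parts
    if parts.any (fun p => p == "..") then normalized
    else PySem.Str.join "/" parts

-- ===== PORT B =====
def storage_key_py_alt (path : String) (marker : String) : String :=
  let normalized := PySem.Str.replace (PySem.Str.strip path) "\\" "/"
  if normalized == "" then normalized
  else
    let r := ((PySem.Str.split? normalized "/").getD []).foldl
      (fun (st : List String × Bool) seg =>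
        if seg == "" || seg == "." then st
        else if seg == marker then ([], false)
        else (st.1 ++ [seg], st.2 || (seg == "..")))
      (([] : List String), false)
    if r.2 then normalized else PySem.Str.join "/" r.1

-- ===== PRECONDITION & SPEC =====
def Spec_storage_key_py (path : String) (marker : String) (out : String) : Prop := out = storage_key_py_alt path marker
instance (path : String) (marker : String) (out : String) : Decidable (Spec_storage_key_py path marker out) := by unfold Spec_storage_key_py; infer_instance

-- ===== CLAIM (what is proved, stated in full; the proofs are below) =====
def Claim_equal_storage_key_py : Prop := ∀ (path : String) (marker : String), Dom_storage_key_py path marker → Spec_storage_key_py path marker (storage_key_py path marker)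

-- ===== LEMMAS AND PROOFS =====
/-- Everything after the last occurrence of `marker` (the whole list if `marker` is absent). -/
def tailAfter (marker : String) : List String → List String
  | [] => []
  | p :: t => if marker ∈ t then tailAfter marker t else if p = marker then t else p :: tailAfter marker t

/-- The reset-scan on an already filtered list. -/
theorem foldl_reset (marker : String) (l : List String) (a : List String) :
    l.foldl (fun acc p => if p == marker then [] else acc ++ [p]) a =
      if marker ∈ l then tailAfter marker l else a ++ l := by
  induction l generalizing a with
  | nil => simp
  | cons p t ih =>
    rw [List.foldl_cons, ih]
    by_cases hp : p = marker
    · subst hp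
      by_cases hmt : p ∈ t
      · simp [hmt, tailAfter]
      · simp [hmt, tailAfter]
    · by_cases hmt : marker ∈ t
      · simp [hmt, tailAfter]
      · have hnm : marker ∉ p :: t := by
          simp only [List.mem_cons, not_or]
          exact ⟨fun h => hp h.symm, hmt⟩
        simp [hp, hmt, hnm]

theorem index_drop (marker : String) (l : List String) (h : marker ∈ l) :
    ∃ j, PySem.List.index? l.reverse marker = some j ∧ j < l.length ∧
      l.drop (l.length - j) = tailAfter marker l := by
  induction l with
  | nil => simp at h
  | cons p t ih =>
    by_cases hmt : marker ∈ t
    · obtain ⟨j, hj, hjlt, hdrop⟩ := ih hmt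
      refine ⟨j, ?_, ?_, ?_⟩
      · rw [List.reverse_cons, PySem.List.index?_append_of_mem [p] (by simpa using hmt), hj]
      · simp; omega
      · have hlen : (p :: t).length - j = (t.length - j) + 1 := by simp; omega
        rw [hlen, List.drop_succ_cons, hdrop]
        simp [tailAfter, hmt]
    · have hp : p = marker := by
        rcases List.mem_cons.mp h with h1 | h1
        · exact h1.symm
        · exact absurd h1 hmt
      subst hp
      refine ⟨t.length, ?_, by simp, ?_⟩
      · rw [List.reverse_cons, PySem.List.index?_append_singleton_self t.reverse p (by simpa using hmt)]
        simp
      · have hlen : (p :: t).length - t.length = 1 := by simp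
        rw [hlen]
        simp [tailAfter, hmt]

/-- A's staged middle (contains / reversed index / slice) equals the filtered reset-scan. -/
theorem middle_eq (marker : String) (l : List String) :
    (if l.contains marker then
        PySem.List.slice l
          (some ((l.length : Int) - 1 - (((PySem.List.index? l.reverse marker).getD 0 : Nat) : Int) + 1)) none
      else l) =
      l.foldl (fun acc p => if p == marker then [] else acc ++ [p]) ([] : List String) := by
  rw [foldl_reset]
  by_cases hm : marker ∈ l
  · obtain ⟨j, hj, hjlt, hdrop⟩ := index_drop marker l hm
    have hc : l.contains marker = true := by simpa using hm
    rw [if_pos hc, if_pos hm, hj]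
    have harith : (l.length : Int) - 1 - ((((some j).getD 0 : Nat)) : Int) + 1 = ((l.length - j : Nat) : Int) := by
      simp only [Option.getD_some]; omega
    rw [harith, PySem.List.slice_from_natCast]
    exact hdrop
  · have hc : l.contains marker = false := by simpa using hm
    rw [if_neg (by simpa using hm), if_neg hm, List.nil_append]

/-- B's fused fold over the raw segments equals the filtered reset-scan paired with its '..' flag. -/
theorem fused_fold (marker : String) (l : List String) (a : List String) :
    l.foldl
      (fun (st : List String × Bool) seg =>
        if seg == "" || seg == "." then st
        else if seg == marker then ([], false)
        else (st.1 ++ [seg], st.2 || (seg == "..")))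
      (a, a.any (fun p => p == "..")) =
    (let r := (l.filter (fun p => p != "" && p != ".")).foldl
        (fun acc p => if p == marker then [] else acc ++ [p]) a
     (r, r.any (fun p => p == ".."))) := by
  induction l generalizing a with
  | nil => simp
  | cons p t ih =>
    by_cases h0 : p = "" ∨ p = "."
    · have hf : (p != "" && p != ".") = false := by
        rcases h0 with h | h <;> subst h <;> simp
      rcases h0 with h | h <;> subst h <;>
        simpa [List.foldl_cons, List.filter_cons, hf] using ih a
    · rw [not_or] at h0
      have hf : (p != "" && p != ".") = true := by simp [h0.1, h0.2]
      by_cases hp : p = marker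
      · subst hp
        have := ih ([] : List String)
        simpa [List.foldl_cons, List.filter_cons, hf, h0.1, h0.2] using this
      · have := ih (a ++ [p])
        simp only [List.any_append] at this
        simpa [List.foldl_cons, List.filter_cons, hf, h0.1, h0.2, hp] using this

theorem fused_fst (marker : String) (l : List String) :
    (l.foldl
      (fun (st : List String × Bool) seg =>
        if seg == "" || seg == "." then st
        else if seg == marker then ([], false)
        else (st.1 ++ [seg], st.2 || (seg == "..")))
      (([] : List String), false)).1 =
    (l.filter (fun p => p != "" && p != ".")).foldl
      (fun acc p => if p == marker then [] else acc ++ [p]) ([] : List String) := by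
  have h := fused_fold marker l []
  simp only [List.any_nil] at h
  rw [h]

theorem fused_snd (marker : String) (l : List String) :
    (l.foldl
      (fun (st : List String × Bool) seg =>
        if seg == "" || seg == "." then st
        else if seg == marker then ([], false)
        else (st.1 ++ [seg], st.2 || (seg == "..")))
      (([] : List String), false)).2 =
    ((l.filter (fun p => p != "" && p != ".")).foldl
      (fun acc p => if p == marker then [] else acc ++ [p]) ([] : List String)).any (fun p => p == "..") := by
  have h := fused_fold marker l []
  simp only [List.any_nil] at h
  rw [h]

-- ===== VERDICT (by name: the statement is the Claim_ definition above) =====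
theorem storage_key_py_spec : Claim_equal_storage_key_py := by
  intro path marker _
  unfold Spec_storage_key_py storage_key_py storage_key_py_alt
  simp only [middle_eq, fused_fst, fused_snd]
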